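-- pv_equiv track=rewrite | github.com/adamdunson/aws-ops-automator | source/code/actions/rds_delete_cluster_snapshot_action.py | custom_aggregation
-- ===== SOURCE A (Python) =====
-- PARAM_RETENTION_COUNT = "RetentionCount"
--
-- def custom_aggregation(resources, params, logger):
--
--     if params.get(PARAM_RETENTION_COUNT, 0) == 0:
--         yield resources
--     else:
--         snapshots_sorted_by_cluster_id = sorted(resources, key=lambda k: k['DBClusterIdentifier'])
--         db_cluster_id = snapshots_sorted_by_cluster_id[0]["DBClusterIdentifier"] if len(
--             snapshots_sorted_by_cluster_id) > 0 else None
--         snapshots_for_cluster = []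
--         for snapshot in snapshots_sorted_by_cluster_id:
--             if db_cluster_id != snapshot["DBClusterIdentifier"]:
--                 yield snapshots_for_cluster
--                 db_cluster_id = snapshot["DBClusterIdentifier"]
--                 snapshots_for_cluster = [snapshot]
--             else:
--                 snapshots_for_cluster.append(snapshot)
--         yield snapshots_for_cluster
-- ===== SOURCE B (Python) =====
-- PARAM_RETENTION_COUNT = "RetentionCount"
--
--
-- def custom_aggregation(resources, params, logger):
--     # B: instead of sorting all snapshots and scanning for adjacent-key breaks,
--     # collect the distinct cluster ids, sort them, and emit each cluster's
--     # snapshots by filtering the original list (original order is preserved).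
--     if params.get(PARAM_RETENTION_COUNT, 0) == 0:
--         yield resources
--     else:
--         for cluster_id in sorted({s["DBClusterIdentifier"] for s in resources}):
--             yield [s for s in resources if s["DBClusterIdentifier"] == cluster_id]
-- ===== Notes on version B (the rewrite author's own statement) =====
-- stated objective: idiomatic
-- what changed: A sorts all snapshots by cluster id and scans for adjacent-key breaks with mutable group state; B sorts only the distinct cluster ids and yields each cluster's snapshots by filtering the original list (stable sort makes within-group order the original order in both).
-- intended difference: On empty resources with RetentionCount != 0, A's unconditional trailing yield returns one empty group [[]] while B yields no groups and returns []; an empty snapshot list has no cluster groups, so B's [] is the intended value. — e.g. on custom_aggregation([], [("RetentionCount", 1)], none): A returns [[]], B returns []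
import Mathlib
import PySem

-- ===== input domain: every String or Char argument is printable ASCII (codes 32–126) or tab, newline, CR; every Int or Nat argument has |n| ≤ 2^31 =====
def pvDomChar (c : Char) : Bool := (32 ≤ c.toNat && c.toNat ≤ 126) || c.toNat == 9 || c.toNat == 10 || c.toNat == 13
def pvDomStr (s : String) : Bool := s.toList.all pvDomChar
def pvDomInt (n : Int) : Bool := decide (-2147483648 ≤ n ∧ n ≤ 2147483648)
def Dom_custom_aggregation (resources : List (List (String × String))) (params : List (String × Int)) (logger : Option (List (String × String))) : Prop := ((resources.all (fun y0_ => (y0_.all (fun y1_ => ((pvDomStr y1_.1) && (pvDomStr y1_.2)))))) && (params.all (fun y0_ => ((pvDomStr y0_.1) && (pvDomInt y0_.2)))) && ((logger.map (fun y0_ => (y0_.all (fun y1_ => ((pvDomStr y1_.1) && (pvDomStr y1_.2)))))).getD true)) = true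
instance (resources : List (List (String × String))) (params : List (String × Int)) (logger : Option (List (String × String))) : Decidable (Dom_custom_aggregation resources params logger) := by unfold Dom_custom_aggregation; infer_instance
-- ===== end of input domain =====

-- B groups by sorted distinct cluster ids + filter instead of A's sort-then-adjacent-break scan;
-- return-value equivalence (both Pythons are generators, compared as the list of yielded values).

-- ===== PORT A =====
-- snapshot["DBClusterIdentifier"] / params.get("RetentionCount", 0): first-match lookup in the
-- association list; the "" default is only reached outside Pre_ (Python raises KeyError there).
def pvKeyOf (s : List (String × String)) : String :=
  PySem.Dict.getD (PySem.Dict.mk s) "DBClusterIdentifier" ""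

-- the for-loop of A: state = (current cluster id, current group, yielded output)
def pvAggLoop (rest : List (List (String × String))) (cur : Option String)
    (acc : List (List (String × String))) (out : List (List (List (String × String)))) :
    List (List (List (String × String))) :=
  match rest with
  | [] => out ++ [acc]
  | s :: rest' =>
    if cur ≠ some (pvKeyOf s) then
      pvAggLoop rest' (some (pvKeyOf s)) [s] (out ++ [acc])
    else
      pvAggLoop rest' cur (acc ++ [s]) out

def custom_aggregation (resources : List (List (String × String))) (params : List (String × Int)) (logger : Option (List (String × String))) : List (List (List (String × String))) :=
  if PySem.Dict.getD (PySem.Dict.mk params) "RetentionCount" 0 = 0 then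
    [resources]
  else
    let ss := PySem.List.sorted resources pvKeyOf
    let cur : Option String := match ss with
      | [] => none
      | s :: _ => some (pvKeyOf s)
    pvAggLoop ss cur [] []

-- ===== PORT B =====
def custom_aggregation_alt (resources : List (List (String × String))) (params : List (String × Int)) (logger : Option (List (String × String))) : List (List (List (String × String))) :=
  if PySem.Dict.getD (PySem.Dict.mk params) "RetentionCount" 0 = 0 then
    [resources]
  else
    (PySem.List.sorted (PySem.Set.ofList (resources.map pvKeyOf)) (fun k => k)).map
      (fun k => resources.filter (fun s => pvKeyOf s == k))

-- ===== PRECONDITION & SPEC =====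
-- Pre_ excludes only inputs where Python A raises KeyError: RetentionCount nonzero while some
-- snapshot lacks the 'DBClusterIdentifier' key.
def Pre_custom_aggregation (resources : List (List (String × String))) (params : List (String × Int)) (logger : Option (List (String × String))) : Prop :=
  ((params.find? (fun p => p.1 == "RetentionCount")).map Prod.snd).getD 0 = 0 ∨
  ∀ s ∈ resources, s.any (fun p => p.1 == "DBClusterIdentifier") = true
instance (resources : List (List (String × String))) (params : List (String × Int)) (logger : Option (List (String × String))) : Decidable (Pre_custom_aggregation resources params logger) := by unfold Pre_custom_aggregation; infer_instance

def pvWitness_custom_aggregation : (List (List (String × String))) × (List (String × Int)) × (Option (List (String × String))) :=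
  ([[("DBClusterIdentifier", "a")]], [("RetentionCount", 1)], none)

-- On empty resources with RetentionCount != 0, A's unconditional trailing yield returns one empty
-- group [[]] while B yields no groups and returns []; an empty snapshot list has no cluster
-- groups, so B's [] is the intended value.
def D_custom_aggregation (resources : List (List (String × String))) (params : List (String × Int)) (logger : Option (List (String × String))) : Prop :=
  (resources.isEmpty && !(((params.find? (fun p => p.1 == "RetentionCount")).map Prod.snd).getD 0 == 0)) = true
instance (resources : List (List (String × String))) (params : List (String × Int)) (logger : Option (List (String × String))) : Decidable (D_custom_aggregation resources params logger) := by unfold D_custom_aggregation; infer_instance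

def Spec_custom_aggregation (resources : List (List (String × String))) (params : List (String × Int)) (logger : Option (List (String × String))) (out : List (List (List (String × String)))) : Prop := ¬ D_custom_aggregation resources params logger → out = custom_aggregation_alt resources params logger
instance (resources : List (List (String × String))) (params : List (String × Int)) (logger : Option (List (String × String))) (out : List (List (List (String × String)))) : Decidable (Spec_custom_aggregation resources params logger out) := by unfold Spec_custom_aggregation; infer_instance

def pvDiffWitness_custom_aggregation : (List (List (String × String))) × (List (String × Int)) × (Option (List (String × String))) :=
  ([], [("RetentionCount", 1)], none)
def pvDiffWitnessOut_custom_aggregation : (List (List (List (String × String)))) × (List (List (List (String × String)))) :=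
  ([[]], [])

-- ===== CLAIM (what is proved, stated in full; the proofs are below) =====
def Claim_unchanged_custom_aggregation : Prop := ∀ (resources : List (List (String × String))) (params : List (String × Int)) (logger : Option (List (String × String))), Dom_custom_aggregation resources params logger → Pre_custom_aggregation resources params logger → Spec_custom_aggregation resources params logger (custom_aggregation resources params logger)
def Claim_changed_custom_aggregation : Prop := Dom_custom_aggregation (pvDiffWitness_custom_aggregation.1) (pvDiffWitness_custom_aggregation.2.1) (pvDiffWitness_custom_aggregation.2.2) ∧ Pre_custom_aggregation (pvDiffWitness_custom_aggregation.1) (pvDiffWitness_custom_aggregation.2.1) (pvDiffWitness_custom_aggregation.2.2) ∧ D_custom_aggregation (pvDiffWitness_custom_aggregation.1) (pvDiffWitness_custom_aggregation.2.1) (pvDiffWitness_custom_aggregation.2.2) ∧ custom_aggregation (pvDiffWitness_custom_aggregation.1) (pvDiffWitness_custom_aggregation.2.1) (pvDiffWitness_custom_aggregation.2.2) = pvDiffWitnessOut_custom_aggregation.1 ∧ custom_aggregation_alt (pvDiffWitness_custom_aggregation.1) (pvDiffWitness_custom_aggregation.2.1) (pvDiffWitness_custom_aggregation.2.2) = pvDiffWitnessOut_custom_aggregation.2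 ∧ pvDiffWitnessOut_custom_aggregation.1 ≠ pvDiffWitnessOut_custom_aggregation.2
def Claim_exact_custom_aggregation : Prop := ∀ (resources : List (List (String × String))) (params : List (String × Int)) (logger : Option (List (String × String))), Dom_custom_aggregation resources params logger → Pre_custom_aggregation resources params logger → D_custom_aggregation resources params logger → custom_aggregation resources params logger ≠ custom_aggregation_alt resources params logger

-- ===== LEMMAS AND PROOFS =====

-- first-match association-list lookup (the port's Dict.getD) as List.find?
theorem pv_dict_getD_eq_find (l : List (String × Int)) (k : String) (d : Int) :
    PySem.Dict.getD (PySem.Dict.mk l) k d = ((l.find? (fun p => p.1 == k)).map Prod.snd).getD d := by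
  induction l with
  | nil => rfl
  | cons p l ih =>
    obtain ⟨k', v⟩ := p
    by_cases h : (k' == k) = true
    · rw [List.find?_cons_of_pos (h := by simpa using h)]
      simp [PySem.Dict.getD, PySem.Dict.get?_mk_cons, h]
    · rw [List.find?_cons_of_neg (h := by simpa using h)]
      simp only [PySem.Dict.getD] at ih ⊢
      rw [PySem.Dict.get?_mk_cons]
      simp only [h, Bool.false_eq_true, if_false]
      exact ih

-- insertBy (the step of PySem's stable sort) keeps the accumulator key-sorted
theorem pv_insertBy_pairwise (x : List (String × String)) (l : List (List (String × String)))
    (hl : l.Pairwise (fun a b => pvKeyOf a ≤ pvKeyOf b)) :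
    (PySem.List.insertBy (fun a b => decide (pvKeyOf a < pvKeyOf b)) x l).Pairwise
      (fun a b => pvKeyOf a ≤ pvKeyOf b) := by
  induction l with
  | nil => simp [PySem.List.insertBy]
  | cons y ys ih =>
    rw [List.pairwise_cons] at hl
    by_cases h : pvKeyOf x < pvKeyOf y
    · simp only [PySem.List.insertBy, h, decide_true, if_pos]
      refine List.pairwise_cons.mpr ⟨?_, List.pairwise_cons.mpr hl⟩
      intro z hz
      rcases List.mem_cons.mp hz with rfl | hz
      · exact le_of_lt h
      · exact le_trans (le_of_lt h) (hl.1 z hz)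
    · simp only [PySem.List.insertBy, h, decide_false, Bool.false_eq_true, if_false]
      refine List.pairwise_cons.mpr ⟨?_, ih hl.2⟩
      intro z hz
      rcases (PySem.List.mem_insertBy _ x z ys).mp hz with rfl | hz
      · exact le_of_not_gt h
      · exact hl.1 z hz

-- filtering away the inserted element leaves the filter unchanged
theorem pv_filter_insertBy_ne (x : List (String × String)) (l : List (List (String × String)))
    (p : List (String × String) → Bool) (hx : p x = false) :
    (PySem.List.insertBy (fun a b => decide (pvKeyOf a < pvKeyOf b)) x l).filter p = l.filter p := by
  induction l with
  | nil => simp [PySem.List.insertBy, hx]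
  | cons y ys ih =>
    by_cases h : pvKeyOf x < pvKeyOf y
    · simp [PySem.List.insertBy, h, hx]
    · have hd : PySem.List.insertBy (fun a b => decide (pvKeyOf a < pvKeyOf b)) x (y :: ys) =
          y :: PySem.List.insertBy (fun a b => decide (pvKeyOf a < pvKeyOf b)) x ys := by
        simp only [PySem.List.insertBy, h, decide_false, Bool.false_eq_true, if_false]
      rw [hd, List.filter_cons, List.filter_cons, ih]

-- inserting an element with the filtered key appends it to the filtered list (stability)
theorem pv_filter_insertBy_eq (x : List (String × String)) (l : List (List (String × String)))
    (k : String) (hx : pvKeyOf x = k)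
    (hl : l.Pairwise (fun a b => pvKeyOf a ≤ pvKeyOf b)) :
    (PySem.List.insertBy (fun a b => decide (pvKeyOf a < pvKeyOf b)) x l).filter
        (fun s => pvKeyOf s == k) =
      l.filter (fun s => pvKeyOf s == k) ++ [x] := by
  induction l with
  | nil => simp [PySem.List.insertBy, hx]
  | cons y ys ih =>
    rw [List.pairwise_cons] at hl
    by_cases h : pvKeyOf x < pvKeyOf y
    · simp only [PySem.List.insertBy, h, decide_true, if_pos]
      have hy : (pvKeyOf y == k) = false := by
        simp only [beq_eq_false_iff_ne]; intro hyk; rw [hx, ← hyk] at h; exact lt_irrefl _ h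
      have hys : ys.filter (fun s => pvKeyOf s == k) = [] := by
        apply List.filter_eq_nil_iff.mpr
        intro z hz
        simp only [beq_eq_false_iff_ne, Bool.not_eq_true, beq_iff_eq] at *
        intro hzk
        exact absurd (lt_of_lt_of_le h (hl.1 z hz)) (by rw [hx, hzk]; exact lt_irrefl k)
      simp [List.filter_cons, hx, hy, hys]
    · have hd : PySem.List.insertBy (fun a b => decide (pvKeyOf a < pvKeyOf b)) x (y :: ys) =
          y :: PySem.List.insertBy (fun a b => decide (pvKeyOf a < pvKeyOf b)) x ys := by
        simp only [PySem.List.insertBy, h, decide_false, Bool.false_eq_true, if_false]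
      rw [hd, List.filter_cons, List.filter_cons, ih hl.2]
      split <;> simp

-- the filter of the whole insertion-sort fold
theorem pv_filter_foldl (xs : List (List (String × String)))
    (acc : List (List (String × String))) (k : String)
    (hacc : acc.Pairwise (fun a b => pvKeyOf a ≤ pvKeyOf b)) :
    (xs.foldl (fun a x => PySem.List.insertBy (fun a b => decide (pvKeyOf a < pvKeyOf b)) x a)
        acc).filter (fun s => pvKeyOf s == k) =
      acc.filter (fun s => pvKeyOf s == k) ++ xs.filter (fun s => pvKeyOf s == k) := by
  induction xs generalizing acc with
  | nil => simp
  | cons x xs ih =>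
    simp only [List.foldl_cons]
    rw [ih _ (pv_insertBy_pairwise x acc hacc)]
    by_cases hx : pvKeyOf x = k
    · rw [pv_filter_insertBy_eq x acc k hx hacc]
      simp [List.filter_cons, hx]
    · rw [pv_filter_insertBy_ne x acc _ (by simpa using hx)]
      simp [List.filter_cons, hx]

-- STABILITY: filtering one key class out of the stable sort gives the original-order class
theorem pv_filter_sorted (xs : List (List (String × String))) (k : String) :
    (PySem.List.sorted xs pvKeyOf).filter (fun s => pvKeyOf s == k) =
      xs.filter (fun s => pvKeyOf s == k) := by
  rw [PySem.List.sorted_eq_foldl_insertBy]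
  simpa using pv_filter_foldl xs [] k (by simp)

-- Set.add-fold ignores occurrences of an element already in the accumulator
theorem pv_foldl_add_filter (l : List String) (s : PySem.Set String) (a : String) (ha : a ∈ s) :
    l.foldl PySem.Set.add s = (l.filter (fun x => !(x == a))).foldl PySem.Set.add s := by
  induction l generalizing s with
  | nil => simp
  | cons x l ih =>
    by_cases hx : x = a
    · subst hx
      have : PySem.Set.add s x = s := by
        simp [PySem.Set.add, ha]
      simp [List.filter_cons, this, ih s ha]
    · simp only [List.filter_cons, beq_eq_false_iff_ne, ne_eq, hx, not_false_eq_true,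
        Bool.not_eq_eq_eq_not, Bool.not_true, decide_false, Bool.not_false, if_pos,
        List.foldl_cons]
      exact ih _ ((PySem.Set.mem_add s x a).mpr (Or.inl ha))

theorem pv_foldl_add_cons (l : List String) (s : List String) (a : String)
    (hl : ∀ x ∈ l, x ≠ a) :
    l.foldl PySem.Set.add (a :: s) = a :: l.foldl PySem.Set.add s := by
  induction l generalizing s with
  | nil => simp
  | cons x l ih =>
    have hx : x ≠ a := hl x (List.mem_cons_self ..)
    have : PySem.Set.add (a :: s) x = a :: PySem.Set.add s x := by
      simp [PySem.Set.add, PySem.Set.contains, List.contains_cons, hx,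
        (by simpa using hx : (x == a) = false)]
      split_ifs <;> rfl
    simp only [List.foldl_cons, this]
    exact ih _ (fun y hy => hl y (List.mem_cons_of_mem _ hy))

-- first-occurrence dedup, one step
theorem pv_dedup_cons (a : String) (l : List String) :
    PySem.List.dedup (a :: l) = a :: PySem.List.dedup (l.filter (fun x => !(x == a))) := by
  have h1 : PySem.List.dedup (a :: l) = l.foldl PySem.Set.add [a] := by
    simp [PySem.List.dedup, PySem.Set.ofList, PySem.Set.empty, PySem.Set.add, PySem.Set.contains]
  rw [h1, pv_foldl_add_filter l [a] a (by simp)]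
  rw [pv_foldl_add_cons _ _ _ (by intro x hx; simpa using (List.mem_filter.mp hx).2)]
  simp [PySem.List.dedup, PySem.Set.ofList, PySem.Set.empty]

-- dedup is a sublist of its input
theorem pv_foldl_add_sublist (l : List String) (s : List String) :
    ∃ t, l.foldl PySem.Set.add s = s ++ t ∧ t.Sublist l := by
  induction l generalizing s with
  | nil => exact ⟨[], by simp⟩
  | cons x l ih =>
    by_cases hx : x ∈ s
    · obtain ⟨t, ht, hs⟩ := ih s
      exact ⟨t, by simpa [PySem.Set.add, hx] using ht, hs.cons x⟩
    · obtain ⟨t, ht, hs⟩ := ih (s ++ [x])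
      exact ⟨x :: t, by simpa [PySem.Set.add, hx] using ht, hs.cons₂ x⟩

theorem pv_dedup_sublist (l : List String) : (PySem.List.dedup l).Sublist l := by
  obtain ⟨t, ht, hs⟩ := pv_foldl_add_sublist l []
  simpa [PySem.List.dedup, PySem.Set.ofList, PySem.Set.empty, ht] using hs

-- B's sorted distinct keys = first-occurrence dedup of the keys of A's sorted list
theorem pv_sortedKeys_eq (xs : List (List (String × String))) :
    PySem.List.sorted (PySem.Set.ofList (xs.map pvKeyOf)) (fun k => k) =
      PySem.List.dedup ((PySem.List.sorted xs pvKeyOf).map pvKeyOf) := by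
  apply PySem.List.sorted_eq_of_perm_of_pairwise_lt
  · apply (List.perm_ext_iff_of_nodup (PySem.List.nodup_dedup _) (PySem.Set.nodup_ofList _)).mpr
    intro a
    rw [PySem.List.mem_dedup, PySem.Set.mem_ofList]
    constructor <;> intro h <;> obtain ⟨y, hy, rfl⟩ := List.mem_map.mp h <;>
      exact List.mem_map.mpr ⟨y, by simpa [PySem.List.mem_sorted] using hy, rfl⟩
  · have hle : (PySem.List.dedup ((PySem.List.sorted xs pvKeyOf).map pvKeyOf)).Pairwise
        (fun a b => a ≤ b) :=
      (PySem.List.sorted_map_key_pairwise xs pvKeyOf).sublist (pv_dedup_sublist _)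
    have hne := PySem.List.nodup_dedup ((PySem.List.sorted xs pvKeyOf).map pvKeyOf)
    exact (hle.and hne).imp (fun h => lt_of_le_of_ne h.1 h.2)

-- the loop invariant of A's grouping scan over a key-sorted list
theorem pv_aggLoop_eq (rest : List (List (String × String))) (k : String)
    (acc : List (List (String × String))) (out : List (List (List (String × String))))
    (hsorted : rest.Pairwise (fun a b => pvKeyOf a ≤ pvKeyOf b))
    (hge : ∀ s ∈ rest, k ≤ pvKeyOf s) :
    pvAggLoop rest (some k) acc out =
      out ++ [acc ++ rest.filter (fun s => pvKeyOf s == k)] ++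
        (PySem.List.dedup ((rest.filter (fun s => !(pvKeyOf s == k))).map pvKeyOf)).map
          (fun k' => rest.filter (fun s => pvKeyOf s == k')) := by
  induction rest generalizing k acc out with
  | nil => simp [pvAggLoop]
  | cons s rest' ih =>
    rw [List.pairwise_cons] at hsorted
    by_cases hk : pvKeyOf s = k
    · have hcond : ¬ (some k ≠ some (pvKeyOf s)) := by simp [hk]
      rw [pvAggLoop, if_neg hcond]
      rw [ih k (acc ++ [s]) out hsorted.2 (fun z hz => hge z (List.mem_cons_of_mem _ hz))]
      have hmap : (PySem.List.dedup ((rest'.filter (fun t => !(pvKeyOf t == k))).map pvKeyOf)).map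
            (fun k' => rest'.filter (fun t => pvKeyOf t == k')) =
          (PySem.List.dedup ((rest'.filter (fun t => !(pvKeyOf t == k))).map pvKeyOf)).map
            (fun k' => (s :: rest').filter (fun t => pvKeyOf t == k')) := by
        apply List.map_congr_left
        intro k' hk'
        rw [PySem.List.mem_dedup] at hk'
        obtain ⟨t, ht, rfl⟩ := List.mem_map.mp hk'
        have : (pvKeyOf s == pvKeyOf t) = false := by
          have := (List.mem_filter.mp ht).2
          simp only [Bool.not_eq_eq_eq_not, Bool.not_true, beq_eq_false_iff_ne, ne_eq] at this ⊢
          rw [hk]; exact fun h => this h.symm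
        simp [List.filter_cons, this]
      rw [hmap]
      simp [List.filter_cons, hk]
    · have hcond : (some k ≠ some (pvKeyOf s)) := by simp [ne_comm.mp hk]
      rw [pvAggLoop, if_pos hcond]
      have hge' : ∀ z ∈ rest', pvKeyOf s ≤ pvKeyOf z := hsorted.1
      rw [ih (pvKeyOf s) [s] (out ++ [acc]) hsorted.2 hge']
      have hklt : k < pvKeyOf s := lt_of_le_of_ne (hge s (List.mem_cons_self ..)) (Ne.symm hk)
      -- no element of s :: rest' has key k
      have hnone : ∀ t ∈ s :: rest', (pvKeyOf t == k) = false := by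
        intro t ht
        rcases List.mem_cons.mp ht with rfl | ht
        · simpa using fun h => absurd (h ▸ hklt) (lt_irrefl _)
        · have := lt_of_lt_of_le hklt (hge' t ht)
          simpa using fun h => absurd (h ▸ this) (lt_irrefl _)
      have hfk : (s :: rest').filter (fun t => pvKeyOf t == k) = [] :=
        List.filter_eq_nil_iff.mpr (by intro t ht; simp [hnone t ht])
      have hfnk : (s :: rest').filter (fun t => !(pvKeyOf t == k)) = s :: rest' :=
        List.filter_eq_self.mpr (by intro t ht; simp [hnone t ht])
      -- keys of the remaining classes differ from pvKeyOf s
      have hmap : (PySem.List.dedup ((rest'.filter (fun t => !(pvKeyOf t == pvKeyOf s))).map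
              pvKeyOf)).map (fun k' => rest'.filter (fun t => pvKeyOf t == k')) =
          (PySem.List.dedup ((rest'.filter (fun t => !(pvKeyOf t == pvKeyOf s))).map pvKeyOf)).map
            (fun k' => (s :: rest').filter (fun t => pvKeyOf t == k')) := by
        apply List.map_congr_left
        intro k' hk'
        rw [PySem.List.mem_dedup] at hk'
        obtain ⟨t, ht, rfl⟩ := List.mem_map.mp hk'
        have : (pvKeyOf s == pvKeyOf t) = false := by
          have := (List.mem_filter.mp ht).2
          simp only [Bool.not_eq_eq_eq_not, Bool.not_true, beq_eq_false_iff_ne, ne_eq] at this ⊢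
          exact fun h => this h.symm
        simp [List.filter_cons, this]
      rw [hmap]
      rw [hfk, hfnk]
      rw [List.map_cons, pv_dedup_cons, List.filter_map]
      simp only [Function.comp_def]
      simp [List.filter_cons]

-- ===== VERDICT (by name: the statement is the Claim_ definition above) =====
theorem custom_aggregation_spec : Claim_unchanged_custom_aggregation := by
  intro resources params logger _ _hpre
  unfold Spec_custom_aggregation
  intro hnD
  unfold custom_aggregation custom_aggregation_alt
  by_cases h0 : PySem.Dict.getD (PySem.Dict.mk params) "RetentionCount" 0 = 0
  · rw [if_pos h0, if_pos h0]
  · rw [if_neg h0, if_neg h0]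
    have hne : resources ≠ [] := by
      intro h
      have hv : ¬ ((params.find? (fun p => p.1 == "RetentionCount")).map Prod.snd).getD 0 = 0 := by
        rw [← pv_dict_getD_eq_find]; exact h0
      exact hnD (by unfold D_custom_aggregation; rw [h]; simp [hv])
    have hssne : PySem.List.sorted resources pvKeyOf ≠ [] := by
      simpa [PySem.List.sorted_eq_nil_iff] using hne
    obtain ⟨s0, t, hss⟩ := List.exists_cons_of_ne_nil hssne
    rw [pv_sortedKeys_eq]
    have hBbody : (PySem.List.dedup ((PySem.List.sorted resources pvKeyOf).map pvKeyOf)).map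
          (fun k => resources.filter (fun s => pvKeyOf s == k)) =
        (PySem.List.dedup ((PySem.List.sorted resources pvKeyOf).map pvKeyOf)).map
          (fun k => (PySem.List.sorted resources pvKeyOf).filter (fun s => pvKeyOf s == k)) := by
      apply List.map_congr_left
      intro k _
      rw [pv_filter_sorted]
    rw [hBbody]
    have hge : ∀ s ∈ s0 :: t, pvKeyOf s0 ≤ pvKeyOf s := by
      intro s hs
      exact PySem.List.key_head_sorted_le resources pvKeyOf hss s
        (by rw [← PySem.List.mem_sorted (key := pvKeyOf) (rev := false), hss]; exact hs)
    have hsorted : (s0 :: t).Pairwise (fun a b => pvKeyOf a ≤ pvKeyOf b) := by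
      have := PySem.List.sorted_pairwise resources pvKeyOf
      rwa [hss] at this
    simp only [hss]
    rw [pv_aggLoop_eq (s0 :: t) (pvKeyOf s0) [] [] hsorted hge]
    rw [List.map_cons, pv_dedup_cons, List.filter_map]
    simp only [Function.comp_def]
    simp [List.filter_cons]

theorem custom_aggregation_changed : Claim_changed_custom_aggregation := by
  unfold Claim_changed_custom_aggregation; decide

theorem custom_aggregation_tight : Claim_exact_custom_aggregation := by
  intro resources params logger _ _ hD
  unfold D_custom_aggregation at hD
  simp only [Bool.and_eq_true, Bool.not_eq_true', beq_eq_false_iff_ne, ne_eq,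
    List.isEmpty_iff] at hD
  obtain ⟨rfl, hv⟩ := hD
  have h0 : ¬ PySem.Dict.getD (PySem.Dict.mk params) "RetentionCount" 0 = 0 := by
    rw [pv_dict_getD_eq_find]; exact hv
  unfold custom_aggregation custom_aggregation_alt
  rw [if_neg h0, if_neg h0]
  simp [PySem.List.sorted, PySem.Set.ofList, PySem.Set.empty, PySem.List.insertBy, pvAggLoop]
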